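-- pv_equiv track=rewrite | github.com/msuryaprakash/Apriori-Algortithm-Flask | apriori_xxxxxxx_1.py | has_infrequent_subset
-- ===== SOURCE A (Python) =====
-- def powersets(s, k):
--     """
--     Returns non-empty subsets of a set
--     """
--     x = len(s)
--     powerset = []
--     list = None
--     for i in range(1, 1 << x):
--         list = [s[j] for j in range(x) if (i & (1 << j))]
--         if len(list) == k:
--             powerset.append(list)
--
--     return powerset
--
-- def has_infrequent_subset(c, data, k):
--     """
--     Returns items with infrequent subset
--     """
--     subsets = powersets(c, k)
--
--     for subset in subsets:
--
--         frequent_subset = False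
--         for item in data:
--             if set(subset) == set(item[0]):
--                 frequent_subset = True
--                 break
--
--         if frequent_subset == False:
--             return False
--
--     return True
-- ===== SOURCE B (Python) =====
-- def has_infrequent_subset(c, data, k):
--     """
--     Returns items with infrequent subset
--     """
--     # k <= 0: there are no non-empty subsets of that size, so all pass
--     if k <= 0:
--         return True
--     frequent = {tuple(sorted(set(item[0]))) for item in data}
--
--     def ok(i, need, cur):
--         if need == 0:
--             return tuple(sorted(set(cur))) in frequent
--         if len(c) < i + need:
--             return True
--         return ok(i + 1, need - 1, cur + [c[i]]) and ok(i + 1, need, cur)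
--
--     return ok(0, k, [])
-- ===== Notes on version B (the rewrite author's own statement) =====
-- stated objective: faster
-- what changed: B replaces A's enumeration of all 2^|c| bitmask subsets (filtering for size k) with an inner scan of data per subset by a pruned recursion over only the C(|c|,k) index-combinations, each looked up in a set of canonical (sorted, deduplicated) transactions built once from data.
-- outside the precondition, e.g. on has_infrequent_subset([1], [[]], 2): A returns True, B raises IndexError; on has_infrequent_subset([1], [[[1]], []], 1): A returns True, B raises IndexError
import Mathlib
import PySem

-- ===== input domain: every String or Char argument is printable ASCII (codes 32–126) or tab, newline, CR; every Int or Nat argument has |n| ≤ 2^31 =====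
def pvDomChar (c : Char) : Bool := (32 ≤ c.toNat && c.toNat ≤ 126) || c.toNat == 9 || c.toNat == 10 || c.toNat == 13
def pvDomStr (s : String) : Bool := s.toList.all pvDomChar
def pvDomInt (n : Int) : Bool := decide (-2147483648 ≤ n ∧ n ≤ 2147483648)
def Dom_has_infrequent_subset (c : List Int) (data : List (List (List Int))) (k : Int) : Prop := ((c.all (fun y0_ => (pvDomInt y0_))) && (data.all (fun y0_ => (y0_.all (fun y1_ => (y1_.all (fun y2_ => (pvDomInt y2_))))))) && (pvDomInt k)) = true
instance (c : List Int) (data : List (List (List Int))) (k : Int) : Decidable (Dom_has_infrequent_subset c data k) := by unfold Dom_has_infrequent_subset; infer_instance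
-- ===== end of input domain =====

-- B enumerates only the index-combinations of size k by pruned recursion and looks each one up in a
-- prebuilt set of canonical (sorted, deduplicated) transactions, instead of A's 2^|c| bitmask scan
-- with an inner pass over data per subset.

-- ===== PORT A =====
-- powersets(s, k): for i in range(1, 1 << x): list = [s[j] for j in range(x) if (i & (1 << j))] …
def powersetsA (s : List Int) (k : Int) : List (List Int) :=
  let x := s.length
  (PySem.List.pyRange 1 ((1 : Int) <<< x)).foldl
    (fun powerset i =>
      let l := (List.range x).filterMap
        (fun (j : Nat) => if PySem.Int.band i ((1 : Int) <<< j) != 0 then PySem.List.pyGet? s (j : Int) else none)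
      if (l.length : Int) == k then powerset ++ [l] else powerset) []

-- inner loop: 'for item in data: if set(subset) == set(item[0]): frequent_subset = True; break'
def hisScanA (subset : List Int) : List (List (List Int)) → Bool
  | [] => false
  | item :: rest =>
    if PySem.Set.equal (PySem.Set.ofList subset)
        (PySem.Set.ofList ((PySem.List.pyGet? item 0).getD [])) then true
    else hisScanA subset rest

-- outer loop: 'for subset in subsets: … if frequent_subset == False: return False'
def hisLoopA (data : List (List (List Int))) : List (List Int) → Bool
  | [] => true
  | subset :: rest =>
    let frequent_subset := hisScanA subset data
    if frequent_subset = false then false else hisLoopA data rest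

def has_infrequent_subset (c : List Int) (data : List (List (List Int))) (k : Int) : Bool :=
  hisLoopA data (powersetsA c k)

-- ===== PORT B =====
-- tuple(sorted(set(l))) — the canonical key of a transaction / candidate subset
def canonB (l : List Int) : List Int :=
  PySem.List.sorted (PySem.Set.ofList l) (fun x => x)

-- frequent = {tuple(sorted(set(item[0]))) for item in data}
def freqB (data : List (List (List Int))) : PySem.Set (List Int) :=
  PySem.Set.ofList (data.map (fun item => canonB ((PySem.List.pyGet? item 0).getD [])))

-- ok(i, need, cur): pruned recursion over the index-combinations of c
def okB (c : List Int) (freq : PySem.Set (List Int)) (i need : Nat) (cur : List Int) : Bool :=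
  if need = 0 then PySem.Set.contains freq (canonB cur)
  else if c.length < i + need then true
  else okB c freq (i + 1) (need - 1) (cur ++ [PySem.List.pyGetD c (i : Int) 0])
       && okB c freq (i + 1) need cur
termination_by c.length - i
decreasing_by all_goals omega

def has_infrequent_subset_alt (c : List Int) (data : List (List (List Int))) (k : Int) : Bool :=
  if k ≤ 0 then true
  else okB c (freqB data) 0 k.toNat []

-- ===== PRECONDITION & SPEC =====
-- Pre_ excludes inputs with k ≥ 1 where some transaction in data is the empty list []: A's item[0]
-- raises IndexError on (some of) them, and on the rest B's own index construction would raise there.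
def Pre_has_infrequent_subset (c : List Int) (data : List (List (List Int))) (k : Int) : Prop :=
  k ≤ 0 ∨ ∀ item ∈ data, item ≠ []
instance (c : List Int) (data : List (List (List Int))) (k : Int) : Decidable (Pre_has_infrequent_subset c data k) := by unfold Pre_has_infrequent_subset; infer_instance

def pvWitness_has_infrequent_subset : List Int × List (List (List Int)) × Int :=
  ([1, 2], [[[1]], [[2]], [[2, 1]]], 2)

def Spec_has_infrequent_subset (c : List Int) (data : List (List (List Int))) (k : Int) (out : Bool) : Prop := out = has_infrequent_subset_alt c data k
instance (c : List Int) (data : List (List (List Int))) (k : Int) (out : Bool) : Decidable (Spec_has_infrequent_subset c data k out) := by unfold Spec_has_infrequent_subset; infer_instance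

-- ===== CLAIM (what is proved, stated in full; the proofs are below) =====
def Claim_equal_has_infrequent_subset : Prop := ∀ (c : List Int) (data : List (List (List Int))) (k : Int), Dom_has_infrequent_subset c data k → Pre_has_infrequent_subset c data k → Spec_has_infrequent_subset c data k (has_infrequent_subset c data k)

-- ===== LEMMAS AND PROOFS =====

-- Nat-level bitmask subset of s: [s[j] for j in range(len s) if bit j of n is set]
def maskN (s : List Int) (n : Nat) : List Int :=
  (List.range s.length).filterMap (fun j => if n.testBit j then s[j]? else none)

lemma mask_port (s : List Int) (n : Nat) :
    (List.range s.length).filterMap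
      (fun (j : Nat) => if PySem.Int.band (n : Int) ((1 : Int) <<< j) != 0 then PySem.List.pyGet? s (j : Int) else none)
      = maskN s n := by
  unfold maskN
  apply List.filterMap_congr
  intro j hj
  have h1 : ((1:Int) <<< j) = ((1 <<< j : Nat) : Int) := Int.mem_toNat?.mp rfl
  rw [h1, PySem.Int.band_natCast, PySem.List.pyGet?_natCast]
  cases h : n.testBit j
  · have h0 : n &&& 1 <<< j = 0 := by rw [Nat.shiftLeft_eq, one_mul, Nat.and_two_pow, h]; simp
    simp [h0]
  · have h0 : n &&& 1 <<< j ≠ 0 := by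
      rw [Nat.shiftLeft_eq, one_mul, Nat.and_two_pow, h]
      simp only [Bool.toNat_true, one_mul]
      exact (Nat.two_pow_pos j).ne'
    simp [h0]

lemma maskN_zero (s : List Int) : maskN s 0 = [] := by simp [maskN]

lemma maskN_ne_nil (s : List Int) (n : Nat) (h1 : 1 ≤ n) (h2 : n < 2 ^ s.length) :
    maskN s n ≠ [] := by
  intro hnil
  rw [maskN, List.filterMap_eq_nil_iff] at hnil
  have hb : ∀ i, n.testBit i = false := by
    intro i
    by_cases hi : i < s.length
    · have h := hnil i (List.mem_range.mpr hi)
      by_cases ht : n.testBit i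
      · rw [if_pos ht, List.getElem?_eq_none_iff] at h; omega
      · simpa using ht
    · exact Nat.testBit_lt_two_pow
        (lt_of_lt_of_le h2 (Nat.pow_le_pow_right (by norm_num) (by omega)))
  have : n = 0 := Nat.eq_of_testBit_eq (fun i => by rw [hb i, Nat.zero_testBit])
  omega

lemma maskN_cons (a : Int) (s : List Int) (n : Nat) :
    maskN (a :: s) n = (if n.testBit 0 then [a] else []) ++ maskN s (n / 2) := by
  unfold maskN
  simp only [List.length_cons, List.range_succ_eq_map, List.filterMap_cons, List.filterMap_map]
  cases h : n.testBit 0 <;>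
    simp [Nat.testBit_add_one]

lemma exists_mask_iff_sublist (s : List Int) : ∀ (l : List Int),
    (∃ n, n < 2 ^ s.length ∧ maskN s n = l) ↔ l.Sublist s := by
  induction s with
  | nil =>
    intro l
    constructor
    · rintro ⟨n, hn, rfl⟩
      have : n = 0 := by simpa using hn
      subst this; simp [maskN_zero]
    · intro h
      rw [List.sublist_nil] at h
      exact ⟨0, by norm_num, by simp [maskN_zero, h]⟩
  | cons a s ih =>
    intro l
    constructor
    · rintro ⟨n, hn, rfl⟩
      rw [maskN_cons]
      have hd : n / 2 < 2 ^ s.length := by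
        rw [List.length_cons, pow_succ] at hn; omega
      have hsub : (maskN s (n / 2)).Sublist s := (ih _).1 ⟨n / 2, hd, rfl⟩
      cases h : n.testBit 0
      · simpa using hsub.cons a
      · simpa using hsub.cons₂ a
    · intro hl
      rw [List.sublist_cons_iff] at hl
      rcases hl with h | ⟨r, rfl, hr⟩
      · obtain ⟨n, hn, rfl⟩ := (ih l).2 h
        have hb : 2 * n < 2 ^ (a :: s).length := by
          rw [List.length_cons, pow_succ]; omega
        have h0 : (2 * n).testBit 0 = false := by
          rw [Nat.testBit_zero, decide_eq_false_iff_not]; omega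
        have h2 : 2 * n / 2 = n := by omega
        refine ⟨2 * n, hb, ?_⟩
        rw [maskN_cons, h0, h2]
        simp
      · obtain ⟨n, hn, rfl⟩ := (ih r).2 hr
        have hb : 2 * n + 1 < 2 ^ (a :: s).length := by
          rw [List.length_cons, pow_succ]; omega
        have h0 : (2 * n + 1).testBit 0 = true := by
          rw [Nat.testBit_zero, decide_eq_true_eq]; omega
        have h2 : (2 * n + 1) / 2 = n := by omega
        refine ⟨2 * n + 1, hb, ?_⟩
        rw [maskN_cons, h0, h2]
        simp

lemma mem_powersetsA (s : List Int) (k : Int) (l : List Int) :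
    l ∈ powersetsA s k ↔ (l.Sublist s ∧ l ≠ [] ∧ (l.length : Int) = k) := by
  have hb : ((1 : Int) <<< s.length) = ((2 ^ s.length : Nat) : Int) := by
    have h1 : ((1:Int) <<< s.length) = ((1 <<< s.length : Nat) : Int) := Int.mem_toNat?.mp rfl
    rw [h1, Nat.shiftLeft_eq, one_mul]
  unfold powersetsA
  rw [PySem.List.foldl_append_if
    (fun i => (((List.range s.length).filterMap
        (fun (j : Nat) => if PySem.Int.band i ((1 : Int) <<< j) != 0 then PySem.List.pyGet? s (j : Int) else none)).length : Int) == k)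
    (fun i => (List.range s.length).filterMap
        (fun (j : Nat) => if PySem.Int.band i ((1 : Int) <<< j) != 0 then PySem.List.pyGet? s (j : Int) else none))]
  simp only [List.nil_append, List.mem_map, List.mem_filter, PySem.List.mem_pyRange_one, hb]
  constructor
  · rintro ⟨i, ⟨⟨hi1, hi2⟩, hk⟩, rfl⟩
    have hi0 : 0 ≤ i := by omega
    obtain ⟨n, rfl⟩ : ∃ n : Nat, i = (n : Int) := ⟨i.toNat, (Int.toNat_of_nonneg hi0).symm⟩
    have hn1 : 1 ≤ n := by exact_mod_cast hi1
    have hn2 : n < 2 ^ s.length := by exact_mod_cast hi2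
    rw [mask_port]
    refine ⟨(exists_mask_iff_sublist s _).1 ⟨n, hn2, rfl⟩, maskN_ne_nil s n hn1 hn2, ?_⟩
    rw [mask_port] at hk
    exact_mod_cast (beq_iff_eq.mp hk)
  · rintro ⟨hs, hne, hk⟩
    obtain ⟨n, hn2, rfl⟩ := (exists_mask_iff_sublist s l).2 hs
    have hn1 : 1 ≤ n := by
      rcases Nat.eq_zero_or_pos n with h0 | h; · exact absurd (h0 ▸ maskN_zero s) hne
      omega
    refine ⟨(n : Int), ⟨⟨by exact_mod_cast hn1, by exact_mod_cast hn2⟩, ?_⟩, mask_port s n⟩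
    rw [mask_port]
    exact beq_iff_eq.mpr hk

lemma hisLoopA_iff (data : List (List (List Int))) (subs : List (List Int)) :
    hisLoopA data subs = true ↔ ∀ l ∈ subs, hisScanA l data = true := by
  induction subs with
  | nil => simp [hisLoopA]
  | cons s rest ih => by_cases h : hisScanA s data = true <;> simp [hisLoopA, h, ih]

lemma hisScanA_iff (l : List Int) (data : List (List (List Int))) :
    hisScanA l data = true ↔ ∃ item ∈ data,
      ∀ x, x ∈ l ↔ x ∈ (PySem.List.pyGet? item 0).getD [] := by
  induction data with
  | nil => simp [hisScanA]
  | cons item rest ih =>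
    by_cases h : ∀ x, x ∈ l ↔ x ∈ (PySem.List.pyGet? item 0).getD [] <;>
      simp [hisScanA, PySem.Set.equal_iff, PySem.Set.mem_ofList, h, ih]

lemma mem_canonB (l : List Int) (x : Int) : x ∈ canonB l ↔ x ∈ l := by
  unfold canonB
  rw [(PySem.List.sorted_perm (PySem.Set.ofList l) (fun x => x) false).mem_iff,
    PySem.Set.mem_ofList]

lemma canonB_eq_iff (a b : List Int) : canonB a = canonB b ↔ ∀ x, x ∈ a ↔ x ∈ b := by
  constructor
  · intro h x
    rw [← mem_canonB a, ← mem_canonB b, h]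
  · intro h
    have hperm : (canonB a).Perm (PySem.Set.ofList b) := by
      refine ((PySem.List.sorted_perm (PySem.Set.ofList a) (fun x => x) false).trans ?_)
      rw [List.perm_ext_iff_of_nodup (PySem.Set.nodup_ofList a) (PySem.Set.nodup_ofList b)]
      intro x
      rw [PySem.Set.mem_ofList, PySem.Set.mem_ofList]
      exact h x
    exact (PySem.List.sorted_eq_of_perm_of_pairwise_lt _ _ _ hperm
      (PySem.List.sorted_ofList_pairwise_lt a)).symm

lemma freqB_contains (data : List (List (List Int))) (l : List Int) :
    PySem.Set.contains (freqB data) (canonB l) = true ↔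
      ∃ item ∈ data, ∀ x, x ∈ l ↔ x ∈ (PySem.List.pyGet? item 0).getD [] := by
  unfold freqB
  rw [PySem.Set.contains_iff, PySem.Set.mem_ofList, List.mem_map]
  constructor
  · rintro ⟨item, hmem, heq⟩
    refine ⟨item, hmem, fun x => ?_⟩
    have := (canonB_eq_iff _ _).1 heq x
    tauto
  · rintro ⟨item, hmem, h⟩
    exact ⟨item, hmem, (canonB_eq_iff _ _).2 (fun x => (h x).symm)⟩

lemma okB_spec (cs : List Int) (freq : PySem.Set (List Int)) :
    ∀ (i need : Nat) (cur : List Int), okB cs freq i need cur = true ↔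
      ∀ l, l.Sublist (cs.drop i) → l.length = need →
        PySem.Set.contains freq (canonB (cur ++ l)) = true := by
  intro i need cur
  induction i, need, cur using okB.induct cs with
  | case1 i cur =>
    rw [okB]
    constructor
    · intro h l hl hlen
      rw [List.length_eq_zero_iff] at hlen
      subst hlen
      simpa using h
    · intro h
      simpa using h [] (List.nil_sublist _) rfl
  | case2 i need cur h0 hlt =>
    rw [okB, if_neg h0, if_pos hlt]
    simp only [true_iff]
    intro l hl hlen
    have := hl.length_le
    rw [List.length_drop] at this
    omega
  | case3 i need cur h0 hlt ih1 ih2 =>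
    rw [okB, if_neg h0, if_neg hlt]
    have hi : i < cs.length := by omega
    have hdrop : cs.drop i = cs[i] :: cs.drop (i + 1) := List.drop_eq_getElem_cons hi
    have hget : PySem.List.pyGetD cs (i : Int) 0 = cs[i] := by
      rw [PySem.List.pyGetD_natCast]
      exact List.getD_eq_getElem cs 0 hi
    rw [Bool.and_eq_true, ih1, ih2, hdrop]
    constructor
    · rintro ⟨h1, h2⟩ l hl hlen
      rw [List.sublist_cons_iff] at hl
      rcases hl with hl | ⟨r, rfl, hr⟩
      · exact h2 l hl hlen
      · have : r.length = need - 1 := by simp at hlen; omega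
        have h3 := h1 r hr this
        rw [hget] at h3
        rw [List.append_cons]
        simpa [List.append_assoc] using h3
    · intro h
      constructor
      · intro r hr hrlen
        have : (cs[i] :: r).Sublist (cs[i] :: cs.drop (i + 1)) := hr.cons₂ _
        have hlen : (cs[i] :: r).length = need := by simp; omega
        have h3 := h _ this hlen
        rw [List.append_cons] at h3
        rw [hget]
        simpa [List.append_assoc] using h3
      · intro l hl hlen
        exact h l (hl.cons _) hlen

lemma A_iff (c : List Int) (data : List (List (List Int))) (k : Int) :
    has_infrequent_subset c data k = true ↔
      ∀ l, l.Sublist c → l ≠ [] → (l.length : Int) = k → hisScanA l data = true := by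
  unfold has_infrequent_subset
  rw [hisLoopA_iff]
  constructor
  · intro h l hs hne hk; exact h l ((mem_powersetsA c k l).2 ⟨hs, hne, hk⟩)
  · intro h l hl
    obtain ⟨hs, hne, hk⟩ := (mem_powersetsA c k l).1 hl
    exact h l hs hne hk

-- ===== VERDICT (by name: the statement is the Claim_ definition above) =====
theorem has_infrequent_subset_spec : Claim_equal_has_infrequent_subset := by
  intro c data k _ _
  unfold Spec_has_infrequent_subset has_infrequent_subset_alt
  by_cases hk : k ≤ 0
  · rw [if_pos hk]
    refine (A_iff c data k).2 ?_
    intro l _ hne hlen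
    have : 1 ≤ l.length := List.length_pos_iff.mpr hne
    omega
  · rw [if_neg hk]
    rw [Bool.eq_iff_iff, A_iff, okB_spec]
    simp only [List.drop_zero, List.nil_append]
    constructor
    · intro h l hs hlen
      have hlen' : (l.length : Int) = k := by omega
      have hne : l ≠ [] := by
        intro h0; subst h0; simp at hlen; omega
      exact (freqB_contains data l).2 ((hisScanA_iff l data).1 (h l hs hne hlen'))
    · intro h l hs hne hlen
      have hlen' : l.length = k.toNat := by omega
      exact (hisScanA_iff l data).2 ((freqB_contains data l).1 (h l hs hlen'))
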